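-- pv_equiv track=rewrite | github.com/CharlieSL1/CStore | Convertor/Cab-AudioExporter.py | find_tag_block
-- ===== SOURCE A (Python) =====
-- from typing import List, Optional, Sequence, Tuple
--
-- def find_tag_block(lines: Sequence[str], start_tag: str, end_tag: str) -> Tuple[Optional[int], Optional[int]]:
--     start = None
--     end = None
--     for i, ln in enumerate(lines):
--         if start is None and start_tag in ln:
--             start = i
--             continue
--         if start is not None and end_tag in ln:
--             end = i
--             break
--     return start, end
-- ===== SOURCE B (Python) =====
-- def find_tag_block(lines, start_tag, end_tag):
--     start = next((i for i, ln in enumerate(lines) if start_tag in ln), None)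
--     if start is None:
--         return (None, None)
--     end = next((i for i, ln in enumerate(lines) if i > start and end_tag in ln), None)
--     return (start, end)
-- ===== Notes on version B (the rewrite author's own statement) =====
-- stated objective: simpler
-- what changed: Replaces the single stateful loop (optional start flag, continue, break) with two independent first-match searches: one for the start tag, then one for the first later line containing the end tag.
import Mathlib
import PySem

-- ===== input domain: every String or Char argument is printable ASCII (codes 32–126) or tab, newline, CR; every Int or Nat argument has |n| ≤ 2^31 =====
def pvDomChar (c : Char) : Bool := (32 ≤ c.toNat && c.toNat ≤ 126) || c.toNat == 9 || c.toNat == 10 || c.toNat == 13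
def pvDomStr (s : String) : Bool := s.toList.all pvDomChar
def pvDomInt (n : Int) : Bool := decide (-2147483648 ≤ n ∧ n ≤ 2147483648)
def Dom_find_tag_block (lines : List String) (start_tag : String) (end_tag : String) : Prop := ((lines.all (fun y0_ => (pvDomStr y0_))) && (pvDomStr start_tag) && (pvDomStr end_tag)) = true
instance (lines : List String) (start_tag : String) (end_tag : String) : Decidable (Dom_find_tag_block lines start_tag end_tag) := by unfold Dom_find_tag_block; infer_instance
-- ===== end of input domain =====

-- B replaces A's single stateful scan (optional start flag, continue, break) with two
-- independent first-match searches: the start index, then the first later end-tag line.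


-- ===== PORT A =====
-- A's loop: state (i, start); 'continue' after setting start, 'break' returns (start, some i).
def findTagLoopA (start_tag end_tag : String) : List String → Int → Option Int → Option Int × Option Int
  | [], _, start => (start, none)
  | ln :: rest, i, start =>
    if start.isNone && PySem.Str.isIn start_tag ln then
      findTagLoopA start_tag end_tag rest (i + 1) (some i)
    else if start.isSome && PySem.Str.isIn end_tag ln then
      (start, some i)
    else
      findTagLoopA start_tag end_tag rest (i + 1) start

def find_tag_block (lines : List String) (start_tag : String) (end_tag : String) : Option Int × Option Int :=
  findTagLoopA start_tag end_tag lines 0 none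

-- ===== PORT B =====
-- first i with start_tag in lines[i]  (next(... enumerate ...))
def findStartB (tag : String) : Int → List String → Option Int
  | _, [] => none
  | i, ln :: rest => if PySem.Str.isIn tag ln then some i else findStartB tag (i + 1) rest

-- first i with i > s and end_tag in lines[i]
def findEndB (tag : String) (s : Int) : Int → List String → Option Int
  | _, [] => none
  | i, ln :: rest => if s < i && PySem.Str.isIn tag ln then some i else findEndB tag s (i + 1) rest

def find_tag_block_alt (lines : List String) (start_tag : String) (end_tag : String) : Option Int × Option Int :=
  match findStartB start_tag 0 lines with
  | none => (none, none)
  | some s => (some s, findEndB end_tag s 0 lines)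

-- ===== PRECONDITION & SPEC =====
def Spec_find_tag_block (lines : List String) (start_tag : String) (end_tag : String) (out : Option Int × Option Int) : Prop := out = find_tag_block_alt lines start_tag end_tag
instance (lines : List String) (start_tag : String) (end_tag : String) (out : Option Int × Option Int) : Decidable (Spec_find_tag_block lines start_tag end_tag out) := by unfold Spec_find_tag_block; infer_instance

-- ===== CLAIM (what is proved, stated in full; the proofs are below) =====
def Claim_equal_find_tag_block : Prop := ∀ (lines : List String) (start_tag : String) (end_tag : String), Dom_find_tag_block lines start_tag end_tag → Spec_find_tag_block lines start_tag end_tag (find_tag_block lines start_tag end_tag)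

-- ===== LEMMAS AND PROOFS =====

-- once start = some s is fixed, A's remaining scan is B's end search (all later indices exceed s)
lemma loopA_some_eq (st et : String) (lines : List String) :
    ∀ i s : Int, s < i →
      findTagLoopA st et lines i (some s) = (some s, findEndB et s i lines) := by
  induction lines with
  | nil => intro i s _; rfl
  | cons ln rest ih =>
    intro i s hsi
    by_cases h : PySem.Chars.isIn et.toList ln.toList = true
    · simp [findTagLoopA, findEndB, h, hsi]
    · simp [findTagLoopA, findEndB, h, hsi, ih (i + 1) s (by omega)]

-- B's start search never returns an index below its counter
lemma findStartB_ge (st : String) (lines : List String) :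
    ∀ i s : Int, findStartB st i lines = some s → i ≤ s := by
  induction lines with
  | nil => intro i s h; simp [findStartB] at h
  | cons ln rest ih =>
    intro i s h
    simp only [findStartB] at h
    by_cases hm : PySem.Chars.isIn st.toList ln.toList = true
    · simp [hm] at h; omega
    · simp only [PySem.Str.isIn_eq] at h
      rw [if_neg hm] at h
      have := ih (i + 1) s h; omega

-- A's scan with start still unset, characterised by B's two searches
lemma loopA_none_eq (st et : String) (lines : List String) :
    ∀ i : Int,
      findTagLoopA st et lines i none =
        match findStartB st i lines with
        | none => (none, none)
        | some s => (some s, findEndB et s i lines) := by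
  induction lines with
  | nil => intro i; rfl
  | cons ln rest ih =>
    intro i
    by_cases hm : PySem.Chars.isIn st.toList ln.toList = true
    · have h1 : findTagLoopA st et (ln :: rest) i none
          = findTagLoopA st et rest (i + 1) (some i) := by
        simp [findTagLoopA, hm]
      rw [h1, loopA_some_eq st et rest (i + 1) i (by omega)]
      simp [findStartB, findEndB, hm]
    · have h1 : findTagLoopA st et (ln :: rest) i none
          = findTagLoopA st et rest (i + 1) none := by
        simp [findTagLoopA, hm]
      rw [h1, ih (i + 1)]
      cases hfs : findStartB st (i + 1) rest with
      | none => simp [findStartB, hm, hfs]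
      | some s =>
        have hle := findStartB_ge st rest (i + 1) s hfs
        have hns : ¬ (s < i) := by omega
        simp [findStartB, findEndB, hm, hfs, hns]

-- ===== VERDICT (by name: the statement is the Claim_ definition above) =====
theorem find_tag_block_spec : Claim_equal_find_tag_block := by
  intro lines st et _
  unfold Spec_find_tag_block find_tag_block find_tag_block_alt
  rw [loopA_none_eq]
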